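-- pv_equiv track=rewrite | github.com/ShandyDrm/contrastive-wsd | dataset.py | convert_ukc_to_gnn
-- ===== SOURCE A (Python) =====
-- def convert_ukc_to_gnn(row, key, ukc_gnn_mapping):
--     lst = row[key]
--     gnn_ids = []
--     for i in lst:
--         if i in ukc_gnn_mapping:
--             gnn_ids.append(ukc_gnn_mapping[i])
--         else:
--             return None
--
--     return gnn_ids
-- ===== SOURCE B (Python) =====
-- def convert_ukc_to_gnn(row, key, ukc_gnn_mapping):
--     lst = row[key]
--     if set(lst) <= set(ukc_gnn_mapping):
--         return [ukc_gnn_mapping[i] for i in lst]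
--     return None
-- ===== Notes on version B (the rewrite author's own statement) =====
-- stated objective: alternative
-- what changed: Two staged passes with a set data structure: first a set-inclusion feasibility check (set(lst) <= set(mapping)), then an unconditional mapping pass, instead of A's single pass with a per-item guard and early return.
import Mathlib
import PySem

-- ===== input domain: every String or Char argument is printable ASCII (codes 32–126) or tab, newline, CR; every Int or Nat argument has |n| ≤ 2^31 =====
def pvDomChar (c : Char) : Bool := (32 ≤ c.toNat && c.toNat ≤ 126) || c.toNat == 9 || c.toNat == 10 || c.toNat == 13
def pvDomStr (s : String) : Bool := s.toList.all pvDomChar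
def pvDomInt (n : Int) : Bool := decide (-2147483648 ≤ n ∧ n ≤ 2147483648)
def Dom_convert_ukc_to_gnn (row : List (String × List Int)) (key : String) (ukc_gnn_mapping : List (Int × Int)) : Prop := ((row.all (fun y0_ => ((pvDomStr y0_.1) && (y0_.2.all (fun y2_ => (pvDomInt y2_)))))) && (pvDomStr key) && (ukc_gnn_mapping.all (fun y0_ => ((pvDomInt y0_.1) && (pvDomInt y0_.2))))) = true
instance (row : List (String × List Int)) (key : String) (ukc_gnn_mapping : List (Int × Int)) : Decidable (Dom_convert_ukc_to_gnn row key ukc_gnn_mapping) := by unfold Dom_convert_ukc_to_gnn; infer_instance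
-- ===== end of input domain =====

-- B replaces A's single guarded-accumulator pass by two staged passes over a set:
-- a set-inclusion feasibility check, then an unconditional mapping pass (alternative; return value only).

-- ===== PORT A =====
-- A's loop: walk the list, for each i check membership, append ukc_gnn_mapping[i], else return None.
def convertLoopA (m : List (Int × Int)) : List Int → List Int → Option (List Int)
  | [], acc => some acc
  | i :: rest, acc =>
    match List.lookup i m with
    | some v => convertLoopA m rest (acc ++ [v])
    | none => none

def convert_ukc_to_gnn (row : List (String × List Int)) (key : String) (ukc_gnn_mapping : List (Int × Int)) : Option (List Int) :=
  match List.lookup key row with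
  | some lst => convertLoopA ukc_gnn_mapping lst []
  | none => none  -- Python raises KeyError here; excluded by Pre_

-- ===== PORT B =====
-- B: lst = row[key]; if set(lst) <= set(ukc_gnn_mapping): [m[i] for i in lst] else None.
-- m[i] in the comprehension is guarded by the subset test, so the default of getD is never used.
def convert_ukc_to_gnn_alt (row : List (String × List Int)) (key : String) (ukc_gnn_mapping : List (Int × Int)) : Option (List Int) :=
  match List.lookup key row with
  | none => none
  | some lst =>
    if PySem.Set.issubset (PySem.Set.ofList lst) (PySem.Set.ofList (ukc_gnn_mapping.map Prod.fst)) then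
      some (lst.map (fun i => (List.lookup i ukc_gnn_mapping).getD 0))
    else none

-- ===== PRECONDITION & SPEC =====
-- Pre_ excludes inputs where key is not a key of row: the Python A raises KeyError there.
def Pre_convert_ukc_to_gnn (row : List (String × List Int)) (key : String) (ukc_gnn_mapping : List (Int × Int)) : Prop := key ∈ row.map Prod.fst
instance (row : List (String × List Int)) (key : String) (ukc_gnn_mapping : List (Int × Int)) : Decidable (Pre_convert_ukc_to_gnn row key ukc_gnn_mapping) := by unfold Pre_convert_ukc_to_gnn; infer_instance
def pvWitness_convert_ukc_to_gnn : (List (String × List Int)) × String × (List (Int × Int)) := ([("k", [1, 2, 1])], "k", [(1, 10), (2, 20)])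

def Spec_convert_ukc_to_gnn (row : List (String × List Int)) (key : String) (ukc_gnn_mapping : List (Int × Int)) (out : Option (List Int)) : Prop := out = convert_ukc_to_gnn_alt row key ukc_gnn_mapping
instance (row : List (String × List Int)) (key : String) (ukc_gnn_mapping : List (Int × Int)) (out : Option (List Int)) : Decidable (Spec_convert_ukc_to_gnn row key ukc_gnn_mapping out) := by unfold Spec_convert_ukc_to_gnn; infer_instance

-- ===== CLAIM =====
def Claim_equal_convert_ukc_to_gnn : Prop := ∀ (row : List (String × List Int)) (key : String) (ukc_gnn_mapping : List (Int × Int)), Dom_convert_ukc_to_gnn row key ukc_gnn_mapping → Pre_convert_ukc_to_gnn row key ukc_gnn_mapping → Spec_convert_ukc_to_gnn row key ukc_gnn_mapping (convert_ukc_to_gnn row key ukc_gnn_mapping)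

-- ===== LEMMAS AND PROOFS =====
-- A's loop equals: all present → map, else none.
theorem convertLoopA_eq (m : List (Int × Int)) (lst acc : List Int) :
    convertLoopA m lst acc =
      if lst.all (fun i => (List.lookup i m).isSome) then
        some (acc ++ lst.map (fun i => (List.lookup i m).getD 0))
      else none := by
  induction lst generalizing acc with
  | nil => simp [convertLoopA]
  | cons i rest ih =>
    simp only [convertLoopA, List.all_cons, List.map_cons]
    cases h : List.lookup i m with
    | none => simp
    | some v =>
      simp only [ih, Option.getD_some]
      cases hr : rest.all (fun i => (List.lookup i m).isSome) <;> simp [hr]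

-- B's subset test equals A's per-item presence test.
theorem lookup_isSome_iff (m : List (Int × Int)) (x : Int) :
    (List.lookup x m).isSome = true ↔ x ∈ m.map Prod.fst := by
  induction m with
  | nil => simp [List.lookup]
  | cons p rest ih =>
    obtain ⟨a, b⟩ := p
    by_cases hx : x = a
    · subst hx; simp [List.lookup]
    · have hxa : (x == a) = false := by simp [hx]
      simp [List.lookup, hxa, hx, ih]

theorem subset_eq_all (m : List (Int × Int)) (lst : List Int) :
    PySem.Set.issubset (PySem.Set.ofList lst) (PySem.Set.ofList (m.map Prod.fst)) =
      lst.all (fun i => (List.lookup i m).isSome) := by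
  rw [Bool.eq_iff_iff, PySem.Set.issubset_iff, List.all_eq_true]
  simp only [PySem.Set.mem_ofList, lookup_isSome_iff]

-- ===== VERDICT =====
theorem convert_ukc_to_gnn_spec : Claim_equal_convert_ukc_to_gnn := by
  intro row key m _ _
  unfold Spec_convert_ukc_to_gnn convert_ukc_to_gnn convert_ukc_to_gnn_alt
  cases h : List.lookup key row with
  | none => rfl
  | some lst => simp only [convertLoopA_eq, subset_eq_all]; simp
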